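-- pv_equiv track=rewrite | github.com/steliosot/comfysql | src/comfy_custom/comfysql_runner/sql_parser.py | _split_conditions
-- ===== SOURCE A (Python) =====
-- def _split_conditions(where_clause: str) -> list[str]:
--     parts: list[str] = []
--     buf: list[str] = []
--     quote: str | None = None
--     i = 0
--     while i < len(where_clause):
--         ch = where_clause[i]
--         if quote is not None:
--             buf.append(ch)
--             if ch == quote:
--                 quote = None
--             i += 1
--             continue
--
--         if ch in ("'", '"'):
--             quote = ch
--             buf.append(ch)
--             i += 1
--             continue
--
--         if where_clause[i : i + 3].upper() == "AND":
--             prev = where_clause[i - 1] if i > 0 else " "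
--             nxt = where_clause[i + 3] if i + 3 < len(where_clause) else " "
--             if prev.isspace() and nxt.isspace():
--                 part = "".join(buf).strip()
--                 if part:
--                     parts.append(part)
--                 buf = []
--                 i += 3
--                 continue
--
--         buf.append(ch)
--         i += 1
--
--     tail = "".join(buf).strip()
--     if tail:
--         parts.append(tail)
--     return parts
-- ===== SOURCE B (Python) =====
-- def _split_conditions(where_clause: str) -> list[str]:
--     n = len(where_clause)
--     # pass 1: mark which positions are outside quotes at entry
--     unquoted = [False] * n
--     quote = None
--     for i, ch in enumerate(where_clause):
--         if quote is not None:
--             if ch == quote: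
--                 quote = None
--         else:
--             unquoted[i] = True
--             if ch in ("'", '"'):
--                 quote = ch
--     # pass 2: find split points and slice the original string
--     segs = []
--     start = 0
--     i = 0
--     while i < n:
--         if (unquoted[i]
--                 and where_clause[i:i + 3].upper() == "AND"
--                 and (i == 0 or where_clause[i - 1].isspace())
--                 and (i + 3 >= n or where_clause[i + 3].isspace())):
--             segs.append(where_clause[start:i])
--             i += 3
--             start = i
--         else:
--             i += 1
--     segs.append(where_clause[start:])
--     return [p for s in segs if (p := s.strip())]
-- ===== Notes on version B (the rewrite author's own statement) =====
-- stated objective: alternative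
-- what changed: B replaces A's single pass with a character accumulator buffer by two passes: first a scan building a boolean mask of unquoted positions, then an index scan that records split points and slices the original string, with stripping/filtering done afterwards in one comprehension.
import Mathlib
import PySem

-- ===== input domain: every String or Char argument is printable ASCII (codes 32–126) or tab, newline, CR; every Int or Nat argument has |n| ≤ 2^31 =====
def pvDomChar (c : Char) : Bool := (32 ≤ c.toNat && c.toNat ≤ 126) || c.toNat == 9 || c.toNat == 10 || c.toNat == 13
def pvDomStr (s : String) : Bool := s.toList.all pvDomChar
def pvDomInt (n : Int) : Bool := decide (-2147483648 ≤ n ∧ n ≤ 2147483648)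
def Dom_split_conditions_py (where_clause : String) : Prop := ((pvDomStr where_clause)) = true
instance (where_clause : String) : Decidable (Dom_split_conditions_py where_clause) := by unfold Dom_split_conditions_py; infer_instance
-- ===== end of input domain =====

-- B replaces A's one-pass quote-tracking buffer accumulation by a quote-mask pass plus an index/slice pass; alternative decomposition, same cost.

-- ===== PORT A =====
-- A's while loop: state (parts, buf, quote, i); literal transliteration of each branch.
def splitA_loop (cs : List Char) (parts : List String) (buf : List Char) (quote : Option Char) (i : Nat) : List String :=
  if h : i < cs.length then
    let ch := cs[i]
    match quote with
    | some q =>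
        splitA_loop cs parts (buf ++ [ch]) (if ch == q then none else some q) (i + 1)
    | none =>
        if ch == '\'' || ch == '"' then
          splitA_loop cs parts (buf ++ [ch]) (some ch) (i + 1)
        else if PySem.Chars.upper (PySem.List.slice cs (some (i : Int)) (some ((i : Int) + 3))) == ['A', 'N', 'D'] then
          let prev := if 0 < i then cs.getD (i - 1) ' ' else ' '
          let nxt := if i + 3 < cs.length then cs.getD (i + 3) ' ' else ' '
          if PySem.Chars.isspace prev && PySem.Chars.isspace nxt then
            let part := PySem.Chars.strip buf
            splitA_loop cs (if part ≠ [] then parts ++ [String.ofList part] else parts) [] none (i + 3)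
          else
            splitA_loop cs parts (buf ++ [ch]) none (i + 1)
        else
          splitA_loop cs parts (buf ++ [ch]) none (i + 1)
  else
    let tail := PySem.Chars.strip buf
    if tail ≠ [] then parts ++ [String.ofList tail] else parts
termination_by cs.length - i

def split_conditions_py (where_clause : String) : List String :=
  splitA_loop where_clause.toList [] [] none 0

-- ===== PORT B =====
-- B pass 1: quote-state step and the unquoted-positions mask.
def qstepB (q : Option Char) (c : Char) : Option Char :=
  match q with
  | some qc => if c == qc then none else some qc
  | none => if c == '\'' || c == '"' then some c else none

-- the mask: entry i is true iff position i is outside quotes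
def maskB : List Char → Option Char → List Bool
  | [], _ => []
  | c :: rest, q => q.isNone :: maskB rest (qstepB q c)

-- B pass 2: record split points, slice the original string between them.
def segsB (cs : List Char) (mask : List Bool) (start i : Nat) : List (List Char) :=
  if h : i < cs.length then
    if mask.getD i false
        && PySem.Chars.upper (PySem.List.slice cs (some (i : Int)) (some ((i : Int) + 3))) == ['A', 'N', 'D']
        && (i == 0 || PySem.Chars.isspace (cs.getD (i - 1) ' '))
        && (decide (cs.length ≤ i + 3) || PySem.Chars.isspace (cs.getD (i + 3) ' ')) then
      PySem.List.slice cs (some (start : Int)) (some (i : Int)) :: segsB cs mask (i + 3) (i + 3)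
    else
      segsB cs mask start (i + 1)
  else
    [cs.drop start]
termination_by cs.length - i

def split_conditions_py_alt (where_clause : String) : List String :=
  let cs := where_clause.toList
  (((segsB cs (maskB cs none) 0 0).map PySem.Chars.strip).filter (· ≠ [])).map String.ofList

-- ===== PRECONDITION & SPEC =====
def Spec_split_conditions_py (where_clause : String) (out : List String) : Prop := out = split_conditions_py_alt where_clause
instance (where_clause : String) (out : List String) : Decidable (Spec_split_conditions_py where_clause out) := by unfold Spec_split_conditions_py; infer_instance

-- ===== CLAIM (what is proved, stated in full; the proofs are below) =====
def Claim_equal_split_conditions_py : Prop := ∀ (where_clause : String), Dom_split_conditions_py where_clause → Spec_split_conditions_py where_clause (split_conditions_py where_clause)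

-- ===== LEMMAS AND PROOFS =====

-- quote state after the first i characters
def qafter (cs : List Char) (i : Nat) : Option Char := (cs.take i).foldl qstepB none

lemma maskB_getD (cs : List Char) : ∀ (q : Option Char) (i : Nat), i < cs.length →
    (maskB cs q).getD i false = ((cs.take i).foldl qstepB q).isNone := by
  induction cs with
  | nil => intro q i h; simp at h
  | cons c rest ih =>
    intro q i h
    cases i with
    | zero => simp [maskB]
    | succ j =>
      simp only [maskB, List.getD_cons_succ, List.take_succ_cons, List.foldl_cons]
      exact ih (qstepB q c) j (by simpa using h)

lemma qafter_succ (cs : List Char) (i : Nat) (h : i < cs.length) :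
    qafter cs (i + 1) = qstepB (qafter cs i) cs[i] := by
  unfold qafter
  rw [List.take_succ_eq_append_getElem h, List.foldl_append]
  rfl

lemma qstepB_nonquote (x u : Char) (hu : PySem.Chars.upperChar x = u) (h1 : u ≠ '\'') (h2 : u ≠ '"') :
    qstepB none x = none := by
  have hx1 : x ≠ '\'' := by rintro rfl; exact h1 (by rw [← hu]; decide)
  have hx2 : x ≠ '"' := by rintro rfl; exact h2 (by rw [← hu]; decide)
  simp [qstepB, hx1, hx2]

lemma and_block (cs : List Char) (i : Nat) (h : i < cs.length)
    (hand : PySem.Chars.upper ((cs.drop i).take 3) = ['A','N','D'])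
    (hq : qafter cs i = none) :
    i + 3 ≤ cs.length ∧ qafter cs (i + 3) = none := by
  have hlen : ((cs.drop i).take 3).length = 3 := by
    have := congrArg List.length hand
    simpa [PySem.Chars.upper] using this
  have hle : i + 3 ≤ cs.length := by simp at hlen; omega
  obtain ⟨a, b, c, heq⟩ := List.length_eq_three.mp hlen
  rw [heq] at hand
  simp [PySem.Chars.upper] at hand
  have hget : ∀ k, k < 3 → cs[i+k]? = [a,b,c][k]? := by
    intro k hk
    have := congrArg (fun l => l[k]?) heq
    simp only [List.getElem?_take, List.getElem?_drop] at this
    simpa [hk] using this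
  have h0 : i < cs.length := by omega
  have h1 : i + 1 < cs.length := by omega
  have h2 : i + 2 < cs.length := by omega
  have e0 : cs[i] = a := by have := hget 0 (by omega); simpa [List.getElem?_eq_getElem h0] using this
  have e1 : cs[i+1] = b := by have := hget 1 (by omega); simpa [List.getElem?_eq_getElem h1] using this
  have e2 : cs[i+2] = c := by have := hget 2 (by omega); simpa [List.getElem?_eq_getElem h2] using this
  refine ⟨hle, ?_⟩
  have s1 : qafter cs (i+1) = none := by
    rw [qafter_succ cs i h0, hq, e0, qstepB_nonquote a 'A' hand.1 (by decide) (by decide)]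
  have s2 : qafter cs (i+2) = none := by
    rw [show i+2 = (i+1)+1 by ring, qafter_succ cs (i+1) h1, s1, e1,
        qstepB_nonquote b 'N' hand.2.1 (by decide) (by decide)]
  rw [show i+3 = (i+2)+1 by ring, qafter_succ cs (i+2) h2, s2, e2,
      qstepB_nonquote c 'D' hand.2.2 (by decide) (by decide)]

lemma buf_step (cs : List Char) (start i : Nat) (h1 : start ≤ i) (h : i < cs.length) :
    (cs.drop start).take (i - start) ++ [cs[i]] = (cs.drop start).take (i + 1 - start) := by
  have hd : i - start < (cs.drop start).length := by simp; omega
  have e : (cs.drop start)[i - start] = cs[i] := by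
    rw [List.getElem_drop]; congr 1; omega
  rw [← e, ← List.take_succ_eq_append_getElem hd]
  congr 1; omega

lemma slice3 (cs : List Char) (i : Nat) :
    PySem.List.slice cs (some (i:Int)) (some ((i:Int)+3)) = (cs.drop i).take 3 := by
  have := PySem.List.slice_natCast_add cs i 3
  norm_num at this; exact this

def procB (segs : List (List Char)) : List String :=
  ((segs.map PySem.Chars.strip).filter (· ≠ [])).map String.ofList

lemma procB_cons (x : List Char) (l : List (List Char)) :
    procB (x :: l) = (if PySem.Chars.strip x ≠ [] then [String.ofList (PySem.Chars.strip x)] else []) ++ procB l := by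
  by_cases h : PySem.Chars.strip x = [] <;> simp [procB, h]

lemma main_loop (cs : List Char) : ∀ (k i start : Nat) (parts : List String) (buf : List Char),
    cs.length - i ≤ k → start ≤ i → i ≤ cs.length →
    buf = (cs.drop start).take (i - start) →
    splitA_loop cs parts buf (qafter cs i) i
      = parts ++ procB (segsB cs (maskB cs none) start i) := by
  intro k
  induction k with
  | zero =>
    intro i start parts buf hk hsi hin hbuf
    have hi : ¬ i < cs.length := by omega
    rw [splitA_loop, segsB]
    simp only [dif_neg hi]
    have hbuf' : buf = cs.drop start := by
      rw [hbuf]; apply List.take_of_length_le; simp; omega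
    rw [← hbuf', procB]
    split_ifs with hne <;> simp [hne]
  | succ k ih =>
    intro i start parts buf hk hsi hin hbuf
    by_cases h : i < cs.length
    · have hmask : (maskB cs none).getD i false = (qafter cs i).isNone := maskB_getD cs none i h
      have hbufstep : buf ++ [cs[i]] = (cs.drop start).take (i + 1 - start) := by
        rw [hbuf]; exact buf_step cs start i hsi h
      rcases hq : qafter cs i with _ | qc
      · -- outside quotes: mask true
        rw [hq] at hmask
        simp only [Option.isNone_none] at hmask
        rw [splitA_loop, segsB]
        simp only [dif_pos h]
        by_cases hquote : (cs[i] == '\'' || cs[i] == '"') = true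
        · -- quote char: A opens a quote; B's AND test fails since the slice starts with the quote char
          have hnand : (PySem.Chars.upper (PySem.List.slice cs (some (i:Int)) (some ((i:Int)+3))) == ['A','N','D']) = false := by
            rw [slice3, List.drop_eq_getElem_cons h]
            simp only [List.take_succ_cons, PySem.Chars.upper, List.map_cons]
            rcases (by simpa using hquote : cs[i] = '\'' ∨ cs[i] = '"') with e | e <;> rw [e] <;>
              simp [show PySem.Chars.upperChar '\'' = '\'' from by decide,
                    show PySem.Chars.upperChar '"' = '"' from by decide]
          rw [if_pos hquote, if_neg (by simp [hnand])]
          have hq1 : qafter cs (i + 1) = some cs[i] := by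
            rw [qafter_succ cs i h, hq]; simp [qstepB, hquote]
          have ihh := ih (i+1) start parts _ (by omega) (by omega) (by omega) hbufstep
          rw [hq1] at ihh
          exact ihh
        · -- not a quote char
          rw [if_neg hquote]
          simp only [Bool.or_eq_true, not_or, Bool.not_eq_true] at hquote
          have hq1 : qafter cs (i + 1) = none := by
            rw [qafter_succ cs i h, hq]; simp [qstepB, hquote.1, hquote.2]
          by_cases hand : (PySem.Chars.upper (PySem.List.slice cs (some (i:Int)) (some ((i:Int)+3))) == ['A','N','D']) = true
          · rw [if_pos hand]
            have hand' : PySem.Chars.upper ((cs.drop i).take 3) = ['A','N','D'] := by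
              rw [← slice3]; exact beq_iff_eq.mp hand
            obtain ⟨hle, hq3⟩ := and_block cs i h hand' hq
            have hprev : PySem.Chars.isspace (if 0 < i then cs.getD (i - 1) ' ' else ' ')
                = (i == 0 || PySem.Chars.isspace (cs.getD (i - 1) ' ')) := by
              by_cases h0 : 0 < i
              · rw [if_pos h0]
                have h00 : (i == 0) = false := by simp; omega
                rw [h00, Bool.false_or]
              · have h00 : i = 0 := by omega
                subst h00
                rw [if_neg (by omega), show ((0:Nat) == 0) = true from rfl, Bool.true_or]
                decide
            have hnxt : PySem.Chars.isspace (if i + 3 < cs.length then cs.getD (i + 3) ' ' else ' ')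
                = (decide (cs.length ≤ i + 3) || PySem.Chars.isspace (cs.getD (i + 3) ' ')) := by
              by_cases h3 : i + 3 < cs.length
              · rw [if_pos h3]
                have h33 : decide (cs.length ≤ i + 3) = false := by simp; omega
                rw [h33, Bool.false_or]
              · rw [if_neg h3]
                have h33 : decide (cs.length ≤ i + 3) = true := by simp; omega
                rw [h33, Bool.true_or]
                decide
            rw [hprev, hnxt]
            have hBcond : ((maskB cs none).getD i false
                && PySem.Chars.upper (PySem.List.slice cs (some (i : Int)) (some ((i : Int) + 3))) == ['A', 'N', 'D']
                && (i == 0 || PySem.Chars.isspace (cs.getD (i - 1) ' '))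
                && (decide (cs.length ≤ i + 3) || PySem.Chars.isspace (cs.getD (i + 3) ' ')))
                = ((i == 0 || PySem.Chars.isspace (cs.getD (i - 1) ' '))
                && (decide (cs.length ≤ i + 3) || PySem.Chars.isspace (cs.getD (i + 3) ' '))) := by
              rw [hmask, hand, Bool.true_and, Bool.true_and]
            rw [hBcond]
            by_cases hsp : ((i == 0 || PySem.Chars.isspace (cs.getD (i - 1) ' '))
                && (decide (cs.length ≤ i + 3) || PySem.Chars.isspace (cs.getD (i + 3) ' '))) = true
            · rw [if_pos hsp, if_pos hsp]
              have ihh := ih (i+3) (i+3)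
                  (if PySem.Chars.strip buf ≠ [] then parts ++ [String.ofList (PySem.Chars.strip buf)] else parts)
                  [] (by omega) (by omega) (by omega) (by simp)
              rw [hq3] at ihh
              have hslice : PySem.List.slice cs (some (start:Int)) (some (i:Int)) = buf := by
                rw [PySem.List.slice_natCast, hbuf]
              rw [procB_cons, hslice]
              refine Eq.trans ihh ?_
              split_ifs with hne <;> simp
            · rw [if_neg hsp, if_neg hsp]
              have ihh := ih (i+1) start parts _ (by omega) (by omega) (by omega) hbufstep
              rw [hq1] at ihh
              exact ihh
          · rw [if_neg hand]
            simp only [Bool.not_eq_true] at hand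
            rw [if_neg (by simp [hand])]
            have ihh := ih (i+1) start parts _ (by omega) (by omega) (by omega) hbufstep
            rw [hq1] at ihh
            exact ihh
      · -- inside quotes: mask false
        rw [hq] at hmask
        simp only [Option.isNone_some] at hmask
        rw [splitA_loop, segsB]
        simp only [dif_pos h]
        have hBfalse : ¬ (((maskB cs none).getD i false
            && PySem.Chars.upper (PySem.List.slice cs (some (i : Int)) (some ((i : Int) + 3))) == ['A', 'N', 'D']
            && (i == 0 || PySem.Chars.isspace (cs.getD (i - 1) ' '))
            && (decide (cs.length ≤ i + 3) || PySem.Chars.isspace (cs.getD (i + 3) ' '))) = true) := by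
          rw [hmask]; simp
        rw [if_neg hBfalse]
        have hq1 : qafter cs (i + 1) = (if (cs[i] == qc) = true then none else some qc) := by
          rw [qafter_succ cs i h, hq]; rfl
        have ihh := ih (i+1) start parts _ (by omega) (by omega) (by omega) hbufstep
        rw [hq1] at ihh
        exact ihh
    · rw [splitA_loop, segsB]
      simp only [dif_neg h]
      have hbuf' : buf = cs.drop start := by
        rw [hbuf]; apply List.take_of_length_le; simp; omega
      rw [← hbuf', procB]
      split_ifs with hne <;> simp [hne]

theorem split_conditions_py_eq (w : String) :
    split_conditions_py w = split_conditions_py_alt w := by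
  have h := main_loop w.toList w.toList.length 0 0 [] []
      (by omega) (by omega) (by omega) (by simp)
  simpa [split_conditions_py, split_conditions_py_alt, qafter, procB] using h

-- ===== VERDICT (by name: the statement is the Claim_ definition above) =====
theorem split_conditions_py_spec : Claim_equal_split_conditions_py := by
  intro w _
  unfold Spec_split_conditions_py
  exact split_conditions_py_eq w
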